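-- pv_equiv track=rewrite | github.com/imagej/pyimagej | src/imagej/dims.py | prioritize_rai_axes_order
-- ===== SOURCE A (Python) =====
-- from typing import List, Tuple, Union
--
-- def prioritize_rai_axes_order(
--     axis_types: List["jc.AxisType"], ref_order: List["jc.AxisType"]
-- ) -> List[int]:
--     """Prioritize the axes order to match a reference order.
--
--     The input List of 'AxisType' from the image to be permuted
--     will be prioritized to match (where dimensions exist) to
--     a reference order (e.g. _python_rai_ref_order).
--
--     :param axis_types: List of 'net.imagej.axis.AxisType' from image.
--     :param ref_order: List of 'net.imagej.axis.AxisType' from reference order.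
--     :return: List of int for permuting a image (e.g. [0, 4, 3, 1, 2])
--     """
--     permute_order = []
--     for axis in ref_order:
--         for i in range(len(axis_types)):
--             if axis == axis_types[i]:
--                 permute_order.append(i)
--
--     for i in range(len(axis_types)):
--         if axis_types[i] not in ref_order:
--             permute_order.append(i)
--
--     return permute_order
-- ===== SOURCE B (Python) =====
-- def prioritize_rai_axes_order(axis_types, ref_order):
--     # Sort the axis indices by their rank in ref_order (unknown axes rank last),
--     # with the index itself as tie-breaker so equal-rank axes keep original order.
--     def rank(i):
--         t = axis_types[i]
--         return ref_order.index(t) if t in ref_order else len(ref_order)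
--     return sorted(range(len(axis_types)), key=lambda i: (rank(i), i))
-- ===== Notes on version B (the rewrite author's own statement) =====
-- stated objective: alternative
-- what changed: Replaces A's staged passes (nested ref_order x axis_types scan, then a membership-scanning leftover pass) by a single stable key-based sort: each index gets the rank of its axis in ref_order (unknown axes rank last) and sorted(range(n), key=(rank, index)) produces the permutation.
-- outside the precondition, e.g. on prioritize_rai_axes_order([5], [5, 5]): A returns [0, 0], B returns [0]
import Mathlib
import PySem

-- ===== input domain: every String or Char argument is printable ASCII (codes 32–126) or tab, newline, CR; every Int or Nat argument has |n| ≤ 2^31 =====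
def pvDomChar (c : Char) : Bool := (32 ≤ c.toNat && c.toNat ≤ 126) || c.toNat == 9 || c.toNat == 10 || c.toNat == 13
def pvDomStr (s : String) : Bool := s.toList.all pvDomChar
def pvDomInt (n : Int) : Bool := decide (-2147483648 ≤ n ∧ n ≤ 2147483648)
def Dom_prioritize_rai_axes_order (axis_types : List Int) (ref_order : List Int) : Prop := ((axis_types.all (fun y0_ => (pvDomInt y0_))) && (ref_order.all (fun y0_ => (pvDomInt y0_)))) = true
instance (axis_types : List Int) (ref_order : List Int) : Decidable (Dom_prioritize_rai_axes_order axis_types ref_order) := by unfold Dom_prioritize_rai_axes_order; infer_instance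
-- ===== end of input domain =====

-- B replaces A's staged scans by one stable sort of the indices keyed by (rank in
-- ref_order, index); equal to A whenever ref_order has no duplicate entries (Pre_).


-- ===== PORT A =====
def prioritize_rai_axes_order (axis_types : List Int) (ref_order : List Int) : List Int :=
  -- permute_order = []; for axis in ref_order: for i in range(len(axis_types)): if axis == axis_types[i]: append i
  let permute_order : List Int := ref_order.foldl (fun acc axis =>
    (List.range axis_types.length).foldl (fun acc2 i =>
      if axis = axis_types.getD i 0 then acc2 ++ [(i : Int)] else acc2) acc) []
  -- for i in range(len(axis_types)): if axis_types[i] not in ref_order: append i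
  (List.range axis_types.length).foldl (fun acc i =>
    if axis_types.getD i 0 ∉ ref_order then acc ++ [(i : Int)] else acc) permute_order

-- ===== PORT B =====
-- rank(i) = ref_order.index(axis_types[i]) if axis_types[i] in ref_order else len(ref_order)
-- (i is always a valid index produced by range(len(axis_types)), so pyGetD's default is unused;
--  under the 'in' guard index? is some, so .getD 0 only unwraps it)
def pvRank (axis_types : List Int) (ref_order : List Int) (i : Int) : Int :=
  let t := PySem.List.pyGetD axis_types i 0
  if t ∈ ref_order then (((PySem.List.index? ref_order t).getD 0 : Nat) : Int)
  else (ref_order.length : Int)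

-- return sorted(range(len(axis_types)), key=lambda i: (rank(i), i))
def prioritize_rai_axes_order_alt (axis_types : List Int) (ref_order : List Int) : List Int :=
  PySem.List.sorted2 (PySem.List.pyRange 0 (axis_types.length : Int) 1)
    (fun i => pvRank axis_types ref_order i) (fun i => i) false

-- ===== PRECONDITION & SPEC =====
-- Pre_ excludes ref_order lists with duplicate entries: there A's nested scan emits each
-- matching index once per duplicate occurrence, an accidental duplication of indices in a
-- permutation list (the intended reference orders are duplicate-free), which B emits once.
def Pre_prioritize_rai_axes_order (axis_types : List Int) (ref_order : List Int) : Prop :=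
  ref_order.Nodup
instance (axis_types : List Int) (ref_order : List Int) : Decidable (Pre_prioritize_rai_axes_order axis_types ref_order) := by unfold Pre_prioritize_rai_axes_order; infer_instance

def pvWitness_prioritize_rai_axes_order : List Int × List Int := ([2, 1, 3, 1, 9], [1, 2, 4])

def Spec_prioritize_rai_axes_order (axis_types : List Int) (ref_order : List Int) (out : List Int) : Prop := out = prioritize_rai_axes_order_alt axis_types ref_order
instance (axis_types : List Int) (ref_order : List Int) (out : List Int) : Decidable (Spec_prioritize_rai_axes_order axis_types ref_order out) := by unfold Spec_prioritize_rai_axes_order; infer_instance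

-- ===== CLAIM =====
def Claim_equal_prioritize_rai_axes_order : Prop := ∀ (axis_types : List Int) (ref_order : List Int), Dom_prioritize_rai_axes_order axis_types ref_order → Pre_prioritize_rai_axes_order axis_types ref_order → Spec_prioritize_rai_axes_order axis_types ref_order (prioritize_rai_axes_order axis_types ref_order)

-- ===== LEMMAS AND PROOFS =====

-- strict lexicographic order on indices: first the rank key K, ties by the index itself
def pvLex (K : Int → Int) (a b : Int) : Prop := K a < K b ∨ (K a = K b ∧ a < b)

-- the boolean comparator sorted2 uses, named
def pvBefore (K : Int → Int) (a b : Int) : Bool :=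
  decide (K a < K b) || (!decide (K b < K a) && decide (a < b))

lemma pvBefore_iff (K : Int → Int) (a b : Int) : pvBefore K a b = true ↔ pvLex K a b := by
  unfold pvBefore pvLex
  by_cases h1 : K a < K b <;> by_cases h2 : K b < K a <;> by_cases h3 : a < b <;>
    simp [h1, h2, h3] <;> omega

lemma pvLex_trans (K : Int → Int) {a b c : Int} (h1 : pvLex K a b) (h2 : pvLex K b c) :
    pvLex K a c := by
  unfold pvLex at *; omega

lemma pvLex_total_of_ne (K : Int → Int) {a b : Int} (h : a ≠ b) :
    pvLex K a b ∨ pvLex K b a := by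
  unfold pvLex
  omega

lemma insertBy_cons_eq (before : Int → Int → Bool) (x y : Int) (ys : List Int) :
    PySem.List.insertBy before x (y :: ys)
      = if before x y then x :: y :: ys else y :: PySem.List.insertBy before x ys := rfl

lemma insertBy_pw (K : Int → Int) (x : Int) :
    ∀ (acc : List Int), acc.Pairwise (pvLex K) → (∀ a ∈ acc, a ≠ x) →
    (PySem.List.insertBy (fun a b => pvBefore K a b) x acc).Pairwise (pvLex K) := by
  intro acc
  induction acc with
  | nil => intro _ _; simp [PySem.List.insertBy]
  | cons y t ih =>
    intro hp hne
    rcases List.pairwise_cons.mp hp with ⟨hy, ht⟩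
    rw [insertBy_cons_eq]
    by_cases hb : pvBefore K x y = true
    · rw [if_pos hb]
      have hxy := (pvBefore_iff K x y).mp hb
      refine List.pairwise_cons.mpr ⟨?_, hp⟩
      intro z hz
      rcases List.mem_cons.mp hz with hz | hz
      · exact hz ▸ hxy
      · exact pvLex_trans K hxy (hy z hz)
    · rw [if_neg hb]
      have hyx : pvLex K y x := by
        rcases pvLex_total_of_ne K (Ne.symm (hne y (List.mem_cons_self))) with h | h
        · exact absurd ((pvBefore_iff K x y).mpr h) hb
        · exact h
      refine List.pairwise_cons.mpr ⟨?_, ih ht (fun a ha => hne a (List.mem_cons_of_mem y ha))⟩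
      intro z hz
      rcases (PySem.List.mem_insertBy _ x z t).mp hz with hz | hz
      · exact hz ▸ hyx
      · exact hy z hz

lemma foldl_insertBy_pw (K : Int → Int) :
    ∀ (xs acc : List Int), acc.Pairwise (pvLex K) → (∀ a ∈ acc, a ∉ xs) → xs.Nodup →
      (xs.foldl (fun acc x => PySem.List.insertBy (fun a b => pvBefore K a b) x acc) acc).Pairwise (pvLex K) := by
  intro xs
  induction xs with
  | nil => intro acc hp _ _; exact hp
  | cons x t ih =>
    intro acc hp hdisj hnd
    rcases List.nodup_cons.mp hnd with ⟨hx, hnd'⟩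
    rw [List.foldl_cons]
    refine ih _ ?_ ?_ hnd'
    · exact insertBy_pw K x acc hp (fun a ha => by
        intro he; exact hdisj a ha (he ▸ List.mem_cons_self))
    · intro a ha
      rcases (PySem.List.mem_insertBy _ x a acc).mp ha with h | h
      · exact h ▸ hx
      · exact fun hmem => hdisj a h (List.mem_cons_of_mem x hmem)

-- A's output in Nat-index form: the rank-groups in ref_order order, then the leftovers
def pvAOut (axis_types : List Int) (ref_order : List Int) : List Nat :=
  (ref_order.flatMap (fun axis =>
    (List.range axis_types.length).filter (fun i => decide (axis_types.getD i 0 = axis))))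
  ++ (List.range axis_types.length).filter (fun i => decide (axis_types.getD i 0 ∉ ref_order))

lemma portA_eq (axis_types ref_order : List Int) :
    prioritize_rai_axes_order axis_types ref_order
      = (pvAOut axis_types ref_order).map (fun (i : Nat) => (i : Int)) := by
  unfold prioritize_rai_axes_order pvAOut
  have hinner : ∀ axis : Int,
      (fun (acc2 : List Int) (i : Nat) => if axis = axis_types.getD i 0 then acc2 ++ [(i : Int)] else acc2)
        = (fun (acc2 : List Int) (i : Nat) =>
            if (fun i => decide (axis_types.getD i 0 = axis)) i = true then acc2 ++ [((i : Nat) : Int)] else acc2) := by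
    intro axis; funext acc2 i
    by_cases h : axis = axis_types.getD i 0 <;> simp [h, eq_comm]
  have hleft :
      (fun (acc : List Int) (i : Nat) => if axis_types.getD i 0 ∉ ref_order then acc ++ [(i : Int)] else acc)
        = (fun (acc : List Int) (i : Nat) =>
            if (fun i => decide (axis_types.getD i 0 ∉ ref_order)) i = true then acc ++ [((i : Nat) : Int)] else acc) := by
    funext acc i
    by_cases h : axis_types.getD i 0 ∉ ref_order <;> simp [h]
  simp only [hinner, hleft, PySem.List.foldl_append_if, PySem.List.foldl_append_eq_flatMap,
    List.nil_append, List.map_append, List.map_flatMap]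

lemma partition_perm (f : Nat → Int) :
    ∀ (l : List Int), l.Nodup → ∀ (xs : List Nat),
    ((l.flatMap (fun b => xs.filter (fun i => decide (f i = b))))
      ++ xs.filter (fun i => decide (f i ∉ l))).Perm xs := by
  intro l
  induction l with
  | nil => intro _ xs; simp
  | cons b l' ih =>
    intro hnd xs
    rcases List.nodup_cons.mp hnd with ⟨hb, hnd'⟩
    rw [List.flatMap_cons, List.append_assoc]
    have hgroups : l'.flatMap (fun c => xs.filter (fun i => decide (f i = c)))
        = l'.flatMap (fun c => (xs.filter (fun i => !decide (f i = b))).filter (fun i => decide (f i = c))) := by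
      rw [List.flatMap_def, List.flatMap_def]
      apply congrArg
      apply List.map_congr_left
      intro c hc
      rw [List.filter_filter]
      apply List.filter_congr
      intro i _
      by_cases h : f i = c
      · have hcb : ¬ c = b := fun he => hb (he ▸ hc)
        simp [h, hcb]
      · simp [h]
    have hrest : xs.filter (fun i => decide (f i ∉ b :: l'))
        = (xs.filter (fun i => !decide (f i = b))).filter (fun i => decide (f i ∉ l')) := by
      rw [List.filter_filter]
      apply List.filter_congr
      intro i _
      by_cases h1 : f i = b <;> by_cases h2 : f i ∈ l' <;> simp [h1, h2]
    rw [hgroups, hrest]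
    refine List.Perm.trans (List.Perm.append_left _ (ih hnd' _)) ?_
    exact List.filter_append_perm _ xs

lemma pairwise_flatMap_of {α β : Type} {R : β → β → Prop} (g : α → List β) :
    ∀ (l : List α), (∀ a ∈ l, (g a).Pairwise R) →
      l.Pairwise (fun a b => ∀ x ∈ g a, ∀ y ∈ g b, R x y) →
      (l.flatMap g).Pairwise R := by
  intro l
  induction l with
  | nil => intro _ _; simp
  | cons a t ih =>
    intro hin hcross
    rcases List.pairwise_cons.mp hcross with ⟨hc, hcross'⟩
    rw [List.flatMap_cons]
    refine List.pairwise_append.mpr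
      ⟨hin a List.mem_cons_self, ih (fun b hb => hin b (List.mem_cons_of_mem a hb)) hcross', ?_⟩
    intro x hx y hy
    rcases List.mem_flatMap.mp hy with ⟨b, hb, hyb⟩
    exact hc b hb x hx y hyb

-- position of an axis in ref_order, as B's rank computes it for matched axes
def pvIdx (ref_order : List Int) (axis : Int) : Nat :=
  (PySem.List.index? ref_order axis).getD 0

lemma idx_getElem (ref_order : List Int) (hnd : ref_order.Nodup)
    (j : Nat) (hj : j < ref_order.length) :
    PySem.List.index? ref_order ref_order[j] = some j := by
  rw [PySem.List.index?_eq_some_iff]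
  refine ⟨ref_order.take j, ref_order.drop (j + 1), ?_, List.length_take_of_le (le_of_lt hj), ?_⟩
  · conv_lhs => rw [← List.take_append_drop j ref_order]
    rw [List.drop_eq_getElem_cons hj]
  · intro hv
    obtain ⟨p, hp, hpe⟩ := List.getElem_of_mem hv
    have hpj : p < j := lt_of_lt_of_le hp (by simp [List.length_take])
    have : ref_order[p] = ref_order[j] := by
      rw [← hpe, List.getElem_take]
    exact absurd ((List.Nodup.getElem_inj_iff hnd).mp this) (Nat.ne_of_lt hpj)

lemma idx_lt_len (ref_order : List Int) (axis : Int) (h : axis ∈ ref_order) :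
    pvIdx ref_order axis < ref_order.length := by
  obtain ⟨j, hj, hje⟩ := List.getElem_of_mem h
  unfold pvIdx
  cases hidx : PySem.List.index? ref_order axis with
  | none =>
    exfalso
    rw [PySem.List.index?_eq_idxOf?] at hidx
    exact (List.idxOf?_eq_none_iff.mp hidx) h
  | some k =>
    obtain ⟨hk, _, _⟩ := PySem.List.getElem_of_index?_eq_some hidx
    simpa using hk

lemma rank_of_mem (axis_types ref_order : List Int) (i : Nat) (axis : Int)
    (hmem : axis ∈ ref_order) (hax : axis_types.getD i 0 = axis) :
    pvRank axis_types ref_order (i : Int) = (pvIdx ref_order axis : Int) := by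
  unfold pvRank pvIdx
  rw [PySem.List.pyGetD_natCast, hax, if_pos hmem]

lemma rank_of_leftover (axis_types ref_order : List Int) (i : Nat)
    (hax : axis_types.getD i 0 ∉ ref_order) :
    pvRank axis_types ref_order (i : Int) = (ref_order.length : Int) := by
  unfold pvRank
  rw [PySem.List.pyGetD_natCast, if_neg hax]

lemma ref_pairwise (ref_order : List Int) (hnd : ref_order.Nodup) :
    ref_order.Pairwise (fun a b => pvIdx ref_order a < pvIdx ref_order b) := by
  rw [List.pairwise_iff_getElem]
  intro p q hp hq hpq
  unfold pvIdx
  rw [idx_getElem ref_order hnd p hp, idx_getElem ref_order hnd q hq]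
  simpa using hpq

lemma aOut_pairwise (axis_types ref_order : List Int) (hnd : ref_order.Nodup) :
    ((pvAOut axis_types ref_order).map (fun (i : Nat) => (i : Int))).Pairwise
      (pvLex (pvRank axis_types ref_order)) := by
  rw [List.pairwise_map]
  unfold pvAOut
  have hgrp : ∀ axis ∈ ref_order,
      ∀ i ∈ (List.range axis_types.length).filter (fun i => decide (axis_types.getD i 0 = axis)),
        pvRank axis_types ref_order (i : Int) = (pvIdx ref_order axis : Int) := by
    intro axis hmem i hi
    rcases List.mem_filter.mp hi with ⟨_, hax⟩
    exact rank_of_mem axis_types ref_order i axis hmem (by simpa using hax)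
  refine List.pairwise_append.mpr ⟨?_, ?_, ?_⟩
  · -- matched groups, in ref_order order
    refine pairwise_flatMap_of _ ref_order ?_ ?_
    · intro axis hmem
      refine List.Pairwise.imp_of_mem ?_ ((List.pairwise_lt_range).filter _)
      intro i j hi hj hlt
      right
      refine ⟨?_, by exact_mod_cast hlt⟩
      rw [hgrp axis hmem i hi, hgrp axis hmem j hj]
    · refine List.Pairwise.imp_of_mem ?_ (ref_pairwise ref_order hnd)
      intro a b ha hb hab i hi j hj
      left
      rw [hgrp a ha i hi, hgrp b hb j hj]
      exact_mod_cast hab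
  · -- leftovers: all share the top rank, indices increasing
    refine List.Pairwise.imp_of_mem ?_ ((List.pairwise_lt_range).filter _)
    intro i j hi hj hlt
    rcases List.mem_filter.mp hi with ⟨_, haxi⟩
    rcases List.mem_filter.mp hj with ⟨_, haxj⟩
    right
    refine ⟨?_, by exact_mod_cast hlt⟩
    rw [rank_of_leftover axis_types ref_order i (by simpa using haxi),
      rank_of_leftover axis_types ref_order j (by simpa using haxj)]
  · -- every matched rank is below the leftover rank
    intro i hi j hj
    rcases List.mem_flatMap.mp hi with ⟨axis, hmem, hig⟩
    rcases List.mem_filter.mp hj with ⟨_, haxj⟩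
    left
    rw [hgrp axis hmem i hig, rank_of_leftover axis_types ref_order j (by simpa using haxj)]
    exact_mod_cast idx_lt_len ref_order axis hmem

lemma pvLex_antisymm (K : Int → Int) :
    ∀ (a b : Int), pvLex K a b → pvLex K b a → a = b := by
  intro a b h1 h2
  unfold pvLex at *
  omega

lemma main_eq (axis_types ref_order : List Int) (hnd : ref_order.Nodup) :
    prioritize_rai_axes_order axis_types ref_order
      = prioritize_rai_axes_order_alt axis_types ref_order := by
  rw [portA_eq]
  unfold prioritize_rai_axes_order_alt
  rw [PySem.List.pyRange_zero_natCast]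
  have hfold : PySem.List.sorted2 ((List.range axis_types.length).map (fun k : Nat => (k : Int)))
      (fun i => pvRank axis_types ref_order i) (fun i => i) false
      = ((List.range axis_types.length).map (fun k : Nat => (k : Int))).foldl
          (fun acc x => PySem.List.insertBy
            (fun a b => pvBefore (pvRank axis_types ref_order) a b) x acc) [] := rfl
  have hnodup : ((List.range axis_types.length).map (fun k : Nat => (k : Int))).Nodup :=
    List.Nodup.map (fun _ _ h => by exact_mod_cast h) List.nodup_range
  have hpw2 : (PySem.List.sorted2 ((List.range axis_types.length).map (fun k : Nat => (k : Int)))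
      (fun i => pvRank axis_types ref_order i) (fun i => i) false).Pairwise
      (pvLex (pvRank axis_types ref_order)) := by
    rw [hfold]
    exact foldl_insertBy_pw _ _ [] (List.Pairwise.nil) (by simp) hnodup
  have hperm : ((pvAOut axis_types ref_order).map (fun (i : Nat) => (i : Int))).Perm
      (PySem.List.sorted2 ((List.range axis_types.length).map (fun k : Nat => (k : Int)))
        (fun i => pvRank axis_types ref_order i) (fun i => i) false) := by
    refine List.Perm.trans ?_ (PySem.List.sorted2_perm _ _ _ _).symm
    exact List.Perm.map _ (partition_perm (fun i => axis_types.getD i 0) ref_order hnd _)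
  exact List.eq_of_perm_of_sorted
    (fun a b _ _ h1 h2 => pvLex_antisymm _ a b h1 h2)
    (aOut_pairwise axis_types ref_order hnd) hpw2 hperm

-- ===== VERDICT =====
theorem prioritize_rai_axes_order_spec : Claim_equal_prioritize_rai_axes_order := by
  intro axis_types ref_order _ hpre
  unfold Spec_prioritize_rai_axes_order
  exact main_eq axis_types ref_order hpre
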